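-- pv_equiv track=rewrite | github.com/ACIDKat88/DockerLLM | splitter/parser/final/hashcount.py | count_unique_hash_ids
-- ===== SOURCE A (Python) =====
-- def count_unique_hash_ids(metadata_list):
--     """
--     Count unique hash ids at each level.
--     Returns a dictionary with the number of unique values for:
--       - hash_document
--       - hash_chapter
--       - hash_section
--       - hash_subsection
--     """
--     unique = {"hash_document": set(), "hash_chapter": set(), "hash_section": set(), "hash_subsection": set()}
--     for meta in metadata_list:
--         if meta.get("hash_document"):
--             unique["hash_document"].add(meta["hash_document"])
--         if meta.get("hash_chapter"):
--             unique["hash_chapter"].add(meta["hash_chapter"])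
--         if meta.get("hash_section"):
--             unique["hash_section"].add(meta["hash_section"])
--         if meta.get("hash_subsection"):
--             unique["hash_subsection"].add(meta["hash_subsection"])
--     # Convert sets to counts
--     return {k: len(v) for k, v in unique.items()}
-- ===== SOURCE B (Python) =====
-- def count_unique_hash_ids(metadata_list):
--     """
--     Count unique hash ids at each level (sort-then-scan: no sets at all).
--     For each key, sort the truthy values and count runs of equal adjacent
--     values; on a sorted list the number of runs is the number of distinct
--     values.
--     """
--     result = {}
--     for k in ("hash_document", "hash_chapter", "hash_section", "hash_subsection"):
--         vals = sorted(m[k] for m in metadata_list if m.get(k))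
--         n = 0
--         prev = None
--         for v in vals:
--             if v != prev:
--                 n += 1
--             prev = v
--         result[k] = n
--     return result
-- ===== Notes on version B (the rewrite author's own statement) =====
-- stated objective: alternative
-- what changed: Replaces set-based counting entirely: instead of maintaining four hash sets during one element-major pass, B sorts each key's truthy values and counts runs of equal adjacent values with a prev-pointer scan (distinct count = run count on a sorted list), using no set data structure.
import Mathlib
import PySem

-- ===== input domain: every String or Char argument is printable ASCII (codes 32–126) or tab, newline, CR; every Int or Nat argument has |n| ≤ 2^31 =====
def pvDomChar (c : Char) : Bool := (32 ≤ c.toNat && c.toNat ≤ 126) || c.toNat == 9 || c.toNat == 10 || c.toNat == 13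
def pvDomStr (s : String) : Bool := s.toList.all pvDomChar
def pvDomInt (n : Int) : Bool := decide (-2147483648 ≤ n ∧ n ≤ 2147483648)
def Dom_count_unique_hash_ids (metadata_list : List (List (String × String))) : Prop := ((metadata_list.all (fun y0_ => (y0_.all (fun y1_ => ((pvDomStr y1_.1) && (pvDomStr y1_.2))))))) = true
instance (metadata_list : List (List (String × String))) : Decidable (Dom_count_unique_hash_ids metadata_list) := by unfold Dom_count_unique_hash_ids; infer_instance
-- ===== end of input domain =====

-- B drops the set data structure entirely: per key it sorts the truthy values and
-- counts runs of equal adjacent values with a prev-pointer scan (objective: alternative).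

-- ===== PORT A =====
-- meta.get(k): first-match association-list lookup; "" encodes None (both falsy in the truth test)
def pvGet (m : List (String × String)) (k : String) : String :=
  match m.find? (fun p => p.1 == k) with
  | some p => p.2
  | none => ""

-- loop body of A's single pass: update the four sets from one metadata dict
def pvStepA (u : PySem.Set String × PySem.Set String × PySem.Set String × PySem.Set String)
    (md : List (String × String)) :
    PySem.Set String × PySem.Set String × PySem.Set String × PySem.Set String :=
  let u1 := if pvGet md "hash_document" != "" then PySem.Set.add u.1 (pvGet md "hash_document") else u.1
  let u2 := if pvGet md "hash_chapter" != "" then PySem.Set.add u.2.1 (pvGet md "hash_chapter") else u.2.1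
  let u3 := if pvGet md "hash_section" != "" then PySem.Set.add u.2.2.1 (pvGet md "hash_section") else u.2.2.1
  let u4 := if pvGet md "hash_subsection" != "" then PySem.Set.add u.2.2.2 (pvGet md "hash_subsection") else u.2.2.2
  (u1, u2, u3, u4)

def count_unique_hash_ids (metadata_list : List (List (String × String))) : List (String × Int) :=
  let u := metadata_list.foldl pvStepA (PySem.Set.empty, PySem.Set.empty, PySem.Set.empty, PySem.Set.empty)
  [("hash_document", PySem.Set.len u.1), ("hash_chapter", PySem.Set.len u.2.1),
   ("hash_section", PySem.Set.len u.2.2.1), ("hash_subsection", PySem.Set.len u.2.2.2)]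

-- ===== PORT B =====
-- B's inner scan: n = 0; prev = None; for v in vals: if v != prev: n += 1; prev = v
def pvRuns (prev : Option String) (vals : List String) : Int :=
  match vals with
  | [] => 0
  | v :: rest => (if some v ≠ prev then 1 else 0) + pvRuns (some v) rest

def count_unique_hash_ids_alt (metadata_list : List (List (String × String))) : List (String × Int) :=
  ["hash_document", "hash_chapter", "hash_section", "hash_subsection"].foldl
    (fun res k =>
      let vals := PySem.List.sorted
        ((metadata_list.filter (fun m => pvGet m k != "")).map (fun m => pvGet m k))
        (fun x => x) false
      res ++ [(k, pvRuns none vals)]) []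

-- ===== PRECONDITION & SPEC =====
def Spec_count_unique_hash_ids (metadata_list : List (List (String × String))) (out : List (String × Int)) : Prop := out = count_unique_hash_ids_alt metadata_list
instance (metadata_list : List (List (String × String))) (out : List (String × Int)) : Decidable (Spec_count_unique_hash_ids metadata_list out) := by unfold Spec_count_unique_hash_ids; infer_instance

-- ===== CLAIM (what is proved, stated in full; the proofs are below) =====
def Claim_equal_count_unique_hash_ids : Prop := ∀ (metadata_list : List (List (String × String))), Dom_count_unique_hash_ids metadata_list → Spec_count_unique_hash_ids metadata_list (count_unique_hash_ids metadata_list)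

-- ===== LEMMAS AND PROOFS =====

-- A's per-key collection, generalised over the starting accumulator
def pvCollect (k : String) (l : List (List (String × String))) (s : PySem.Set String) : PySem.Set String :=
  ((l.filter (fun m => pvGet m k != "")).map (fun m => pvGet m k)).foldl PySem.Set.add s

theorem pvCollect_cons (k : String) (m : List (String × String)) (l : List (List (String × String))) (s : PySem.Set String) :
    pvCollect k (m :: l) s =
      pvCollect k l (if pvGet m k != "" then PySem.Set.add s (pvGet m k) else s) := by
  by_cases h : pvGet m k != ""
  · simp [pvCollect, h]
  · simp [pvCollect, h]

theorem pvFoldA_eq (l : List (List (String × String)))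
    (s1 s2 s3 s4 : PySem.Set String) :
    l.foldl pvStepA (s1, s2, s3, s4) =
      (pvCollect "hash_document" l s1, pvCollect "hash_chapter" l s2,
       pvCollect "hash_section" l s3, pvCollect "hash_subsection" l s4) := by
  induction l generalizing s1 s2 s3 s4 with
  | nil => simp [pvCollect]
  | cons m rest ih =>
    simp only [List.foldl_cons, pvStepA, ih, pvCollect_cons]

theorem pvDiscard_of_not_mem (s : PySem.Set String) (x : String) (h : x ∉ s) :
    PySem.Set.discard s x = s := by
  simp only [PySem.Set.discard]
  refine List.filter_eq_self.mpr (fun a ha => ?_)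
  have hne : a ≠ x := fun he => h (he ▸ ha)
  simp [hne]

theorem pvDiscard_add_self (s : PySem.Set String) (x : String) :
    PySem.Set.discard (PySem.Set.discard s x) x = PySem.Set.discard s x := by
  apply pvDiscard_of_not_mem
  intro hmem
  exact ((PySem.Set.mem_discard s x x).mp hmem).2 rfl

-- runs of a sorted tail, relative to a previous element ≤ everything in the tail
theorem pvRuns_sorted_tail (s : List String) (p : String)
    (hs : s.Pairwise (· ≤ ·)) (hp : ∀ y ∈ s, p ≤ y) :
    pvRuns (some p) s = PySem.Set.len (PySem.Set.discard (PySem.Set.ofList s) p) := by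
  induction s generalizing p with
  | nil => simp [pvRuns, PySem.Set.ofList_nil, PySem.Set.discard, PySem.Set.len]
  | cons v rest ih =>
    have hrest : rest.Pairwise (· ≤ ·) := hs.tail
    have hv : ∀ y ∈ rest, v ≤ y := fun y hy => List.rel_of_pairwise_cons hs hy
    have hrec := ih v hrest hv
    by_cases hvp : v = p
    · subst hvp
      simp only [pvRuns]
      rw [if_neg (fun hc => hc rfl), hrec, PySem.Set.ofList_cons]
      have hstep : PySem.Set.discard (v :: PySem.Set.discard (PySem.Set.ofList rest) v) v
          = PySem.Set.discard (PySem.Set.discard (PySem.Set.ofList rest) v) v := by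
        simp [PySem.Set.discard]
      rw [hstep, pvDiscard_add_self]
      omega
    · have hlt : p < v := lt_of_le_of_ne (hp v (List.mem_cons_self)) (Ne.symm hvp)
      have hpnot : p ∉ PySem.Set.discard (PySem.Set.ofList rest) v := by
        intro hmem
        have h1 := ((PySem.Set.mem_discard (PySem.Set.ofList rest) v p).mp hmem).1
        have h2 := (PySem.Set.mem_ofList rest p).mp h1
        exact absurd (hv p h2) (not_le_of_gt hlt)
      simp only [pvRuns]
      rw [if_pos (fun hc => hvp (Option.some.inj hc)), hrec, PySem.Set.ofList_cons]
      have hstep : PySem.Set.discard (v :: PySem.Set.discard (PySem.Set.ofList rest) v) p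
          = v :: PySem.Set.discard (PySem.Set.discard (PySem.Set.ofList rest) v) p := by
        simp only [PySem.Set.discard, List.filter_cons]
        rw [if_pos (by simp [hvp])]
      rw [hstep, pvDiscard_of_not_mem _ _ hpnot]
      simp [PySem.Set.len]
      omega

theorem pvRuns_sorted (s : List String) (hs : s.Pairwise (· ≤ ·)) :
    pvRuns none s = PySem.Set.len (PySem.Set.ofList s) := by
  cases s with
  | nil => rfl
  | cons v rest =>
    have hv : ∀ y ∈ rest, v ≤ y := fun y hy => List.rel_of_pairwise_cons hs hy
    simp only [pvRuns]
    rw [if_pos (show some v ≠ none by simp),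
      pvRuns_sorted_tail rest v hs.tail hv, PySem.Set.ofList_cons]
    simp [PySem.Set.len]
    omega

-- distinct count is invariant under permutation
theorem pvOfList_len_perm (xs ys : List String) (h : xs.Perm ys) :
    PySem.Set.len (PySem.Set.ofList xs) = PySem.Set.len (PySem.Set.ofList ys) := by
  have hperm : (PySem.Set.ofList xs).Perm (PySem.Set.ofList ys) := by
    rw [List.perm_ext_iff_of_nodup (PySem.Set.nodup_ofList _) (PySem.Set.nodup_ofList _)]
    intro a
    rw [PySem.Set.mem_ofList, PySem.Set.mem_ofList]
    exact ⟨fun hx => h.mem_iff.mp hx, fun hy => h.mem_iff.mpr hy⟩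
  simp [PySem.Set.len, hperm.length_eq]

-- B's per-key count equals A's per-key set size
theorem pvKey_count (l : List (List (String × String))) (k : String) :
    pvRuns none (PySem.List.sorted
        ((l.filter (fun m => pvGet m k != "")).map (fun m => pvGet m k)) (fun x => x) false)
      = PySem.Set.len (pvCollect k l PySem.Set.empty) := by
  set L := (l.filter (fun m => pvGet m k != "")).map (fun m => pvGet m k) with hL
  have h1 : pvCollect k l PySem.Set.empty = PySem.Set.ofList L := by
    rw [pvCollect, PySem.Set.ofList_eq_foldl]; rfl
  have hpw : (PySem.List.sorted L (fun x => x) false).Pairwise (· ≤ ·) :=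
    PySem.List.sorted_pairwise L (fun x => x)
  rw [pvRuns_sorted _ hpw, h1]
  exact pvOfList_len_perm _ _ (PySem.List.sorted_perm L (fun x => x) false)

-- ===== VERDICT (by name: the statement is the Claim_ definition above) =====
theorem count_unique_hash_ids_spec : Claim_equal_count_unique_hash_ids := by
  intro l _
  show _ = _
  simp only [count_unique_hash_ids, count_unique_hash_ids_alt, pvFoldA_eq,
    List.foldl_cons, List.foldl_nil, pvKey_count]
  rfl
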